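-- pv_equiv track=rewrite | github.com/Photonsneverrest/mie_bragg_onion | geometry.py | alternating_layer_labels
-- ===== SOURCE A (Python) =====
-- from typing import Callable, Iterable, Literal
--
-- BraggLayerLabel = Literal["A", "B"]
--
-- def _other_label(label: BraggLayerLabel) -> BraggLayerLabel:
--     if label == "A":
--         return "B"
--     if label == "B":
--         return "A"
--     raise ValueError(f"Label must be 'A' or 'B', got {label!r}.")
--
-- def alternating_layer_labels(
--     n_layers: int,
--     outer_layer: BraggLayerLabel,
-- ) -> tuple[BraggLayerLabel, ...]:
--     """
--     Return alternating Bragg layer labels from core -> outer.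
--
--     Example
--     -------
--     n_layers=5, outer_layer="A" -> ("A", "B", "A", "B", "A")
--     n_layers=4, outer_layer="A" -> ("B", "A", "B", "A")
--     """
--     if not isinstance(n_layers, int) or n_layers < 1:
--         raise ValueError(f"n_layers must be an integer >= 1, got {n_layers!r}.")
--     if outer_layer not in ("A", "B"):
--         raise ValueError(f"outer_layer must be 'A' or 'B', got {outer_layer!r}.")
--
--     labels_outer_to_core = tuple(
--         outer_layer if i % 2 == 0 else _other_label(outer_layer)
--         for i in range(n_layers)
--     )
--     return tuple(reversed(labels_outer_to_core))
-- ===== SOURCE B (Python) =====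
-- def alternating_layer_labels(n_layers, outer_layer):
--     if not isinstance(n_layers, int) or n_layers < 1:
--         raise ValueError(f"n_layers must be an integer >= 1, got {n_layers!r}.")
--     if outer_layer not in ("A", "B"):
--         raise ValueError(f"outer_layer must be 'A' or 'B', got {outer_layer!r}.")
--     core = outer_layer if (n_layers - 1) % 2 == 0 else ("B" if outer_layer == "A" else "A")
--     other = "B" if core == "A" else "A"
--     return ((core, other) * ((n_layers + 1) // 2))[:n_layers]
-- ===== Notes on version B (the rewrite author's own statement) =====
-- stated objective: idiomatic
-- what changed: Instead of building the outer-to-core list with a parity-tested comprehension and reversing it, B computes the core label from the parity of n_layers-1 and produces the result by replicating the two-element (core, other) pattern and slicing to length.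
import Mathlib
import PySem

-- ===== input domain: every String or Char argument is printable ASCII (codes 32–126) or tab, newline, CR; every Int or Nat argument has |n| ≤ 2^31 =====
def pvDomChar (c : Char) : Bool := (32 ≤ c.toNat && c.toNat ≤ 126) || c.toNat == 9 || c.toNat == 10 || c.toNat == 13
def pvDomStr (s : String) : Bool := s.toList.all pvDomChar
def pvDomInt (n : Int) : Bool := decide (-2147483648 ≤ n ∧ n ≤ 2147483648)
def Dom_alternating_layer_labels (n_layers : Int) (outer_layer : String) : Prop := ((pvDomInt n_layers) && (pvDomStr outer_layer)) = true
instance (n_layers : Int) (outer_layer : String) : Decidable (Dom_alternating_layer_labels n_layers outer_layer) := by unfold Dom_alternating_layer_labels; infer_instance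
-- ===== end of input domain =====

-- B builds the labels by computing the core label from the parity of n_layers-1 and
-- replicating the two-element pattern, instead of A's outer-to-core comprehension + reverse. Same O(n) cost.

-- ===== PORT A =====
-- _other_label; the final branch raises ValueError, but it is only called with "A"/"B" inside Pre_
def pvOtherLabel (label : String) : String :=
  if label = "A" then "B" else if label = "B" then "A" else ""

def alternating_layer_labels (n_layers : Int) (outer_layer : String) : List String :=
  (((PySem.List.pyRange 0 n_layers 1).map
      (fun i => if PySem.Int.mod i 2 = 0 then outer_layer else pvOtherLabel outer_layer))).reverse

-- ===== PORT B =====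
def alternating_layer_labels_alt (n_layers : Int) (outer_layer : String) : List String :=
  let core := if PySem.Int.mod (n_layers - 1) 2 = 0 then outer_layer
              else (if outer_layer = "A" then "B" else "A")
  let other := if core = "A" then "B" else "A"
  -- ((core, other) * ((n_layers + 1) // 2))[:n_layers]; the slice [:n] with 0 ≤ n is List.take
  ((List.replicate (PySem.Int.floordiv (n_layers + 1) 2).toNat [core, other]).flatten).take n_layers.toNat

-- ===== PRECONDITION & SPEC =====
-- A raises ValueError when n_layers < 1 or outer_layer is not "A"/"B"; exactly those inputs are excluded.
def Pre_alternating_layer_labels (n_layers : Int) (outer_layer : String) : Prop :=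
  1 ≤ n_layers ∧ (outer_layer = "A" ∨ outer_layer = "B")
instance (n_layers : Int) (outer_layer : String) : Decidable (Pre_alternating_layer_labels n_layers outer_layer) := by unfold Pre_alternating_layer_labels; infer_instance

def pvWitness_alternating_layer_labels : Int × String := (4, "A")

def Spec_alternating_layer_labels (n_layers : Int) (outer_layer : String) (out : List String) : Prop := out = alternating_layer_labels_alt n_layers outer_layer
instance (n_layers : Int) (outer_layer : String) (out : List String) : Decidable (Spec_alternating_layer_labels n_layers outer_layer out) := by unfold Spec_alternating_layer_labels; infer_instance

-- ===== CLAIM (what is proved, stated in full; the proofs are below) =====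
def Claim_equal_alternating_layer_labels : Prop := ∀ (n_layers : Int) (outer_layer : String), Dom_alternating_layer_labels n_layers outer_layer → Pre_alternating_layer_labels n_layers outer_layer → Spec_alternating_layer_labels n_layers outer_layer (alternating_layer_labels n_layers outer_layer)

-- ===== LEMMAS AND PROOFS =====

-- the abstract alternating list, core first
def altL : Nat → String → String → List String
  | 0, _, _ => []
  | m+1, c, o => c :: altL m o c

lemma take_flatten_replicate (c o : String) :
    ∀ (k m : Nat), m ≤ 2*k → ((List.replicate k [c,o]).flatten).take m = altL m c o := by
  intro k
  induction k with
  | zero => intro m hm; interval_cases m; simp [altL]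
  | succ k ih =>
      intro m hm
      match m with
      | 0 => simp [altL]
      | 1 => simp [altL, List.replicate_succ]
      | m+2 =>
          have h' : m ≤ 2*k := by omega
          simp only [List.replicate_succ, List.flatten_cons, List.cons_append, List.nil_append,
            List.take_succ_cons, altL]
          rw [ih m h']

lemma reverse_map_range (x y : String) :
    ∀ m : Nat, (((List.range m).map (fun i => if i % 2 = 0 then x else y)).reverse)
      = altL m (if (m-1) % 2 = 0 then x else y) (if m % 2 = 0 then x else y) := by
  intro m
  induction m with
  | zero => simp [altL]
  | succ m ih =>
      rw [List.range_succ, List.map_append, List.reverse_append]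
      simp only [List.map_cons, List.map_nil, List.reverse_cons, List.reverse_nil,
        List.nil_append, List.cons_append, List.nil_append]
      rw [ih]
      have h1 : (m + 1 - 1) % 2 = m % 2 := by omega
      rw [h1]
      show _ = altL (m+1) (if m % 2 = 0 then x else y) _
      simp only [altL]
      congr 1
      match m with
      | 0 => simp [altL]
      | k+1 =>
          have h2 : (k + 1 + 1) % 2 = (k + 1 - 1) % 2 := by omega
          rw [h2]

lemma mod_two_cast (k : Nat) : PySem.Int.mod (k : Int) 2 = 0 ↔ k % 2 = 0 := by
  rw [PySem.Int.mod_eq_emod_of_pos (by omega)]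
  omega

-- ===== VERDICT (by name: the statement is the Claim_ definition above) =====
theorem alternating_layer_labels_spec : Claim_equal_alternating_layer_labels := by
  intro n outer _ hpre
  obtain ⟨hn, houter⟩ := hpre
  unfold Spec_alternating_layer_labels alternating_layer_labels alternating_layer_labels_alt
  obtain ⟨m, rfl⟩ : ∃ m : Nat, n = (m : Int) := ⟨n.toNat, by omega⟩
  have hm1 : 1 ≤ m := by exact_mod_cast hn
  -- A side
  rw [PySem.List.pyRange_one]
  have e0 : (((m : Int)) - 0).toNat = m := by omega
  rw [e0, List.map_map]
  have efun : ((fun i => if PySem.Int.mod i 2 = 0 then outer else pvOtherLabel outer) ∘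
      (fun k : Nat => (0 : Int) + (k : Int)))
      = (fun k : Nat => if k % 2 = 0 then outer else pvOtherLabel outer) := by
    funext k
    show (if PySem.Int.mod ((0:Int) + (k:Int)) 2 = 0 then outer else pvOtherLabel outer) = _
    rw [zero_add]
    by_cases hk : k % 2 = 0
    · rw [if_pos ((mod_two_cast k).mpr hk), if_pos hk]
    · rw [if_neg (fun h => hk ((mod_two_cast k).mp h)), if_neg hk]
  rw [efun, reverse_map_range]
  -- B side
  have ecore : PySem.Int.mod ((m : Int) - 1) 2 = 0 ↔ (m - 1) % 2 = 0 := by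
    have : (m : Int) - 1 = ((m - 1 : Nat) : Int) := by omega
    rw [this]; exact mod_two_cast _
  have ediv : PySem.Int.floordiv ((m : Int) + 1) 2 = (((m+1)/2 : Nat) : Int) := by
    have : (m : Int) + 1 = ((m + 1 : Nat) : Int) := by omega
    rw [this]; exact_mod_cast PySem.Int.floordiv_natCast (m+1) 2
  rw [ediv]
  have etn : ((((m+1)/2 : Nat) : Int)).toNat = (m+1)/2 := by omega
  have etn2 : ((m : Int)).toNat = m := by omega
  rw [etn, etn2]
  rw [take_flatten_replicate _ _ _ m (by omega)]
  -- both are altL m _ _ ; reconcile the two label pairs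
  have hcore : (if PySem.Int.mod ((m:Int) - 1) 2 = 0 then outer else (if outer = "A" then "B" else "A"))
      = (if (m - 1) % 2 = 0 then outer else (if outer = "A" then "B" else "A")) := by
    by_cases hp : (m - 1) % 2 = 0
    · rw [if_pos (ecore.mpr hp), if_pos hp]
    · rw [if_neg (fun h => hp (ecore.mp h)), if_neg hp]
  simp only [hcore]
  have hm2 : m % 2 = 0 ↔ ¬ (m - 1) % 2 = 0 := by omega
  rcases houter with rfl | rfl <;> by_cases hp : (m - 1) % 2 = 0 <;>
    simp [pvOtherLabel, hp, hm2]
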